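-- pv_equiv track=rewrite | github.com/Skianyan/Simulacion | simulaexamen.py | datos_tarjeta
-- ===== SOURCE A (Python) =====
-- def datos_tarjeta(semilla):
--     t = 164976
--     bandera = -1
--     m = (2 ** 31) - 1
--     a = 630360016
--     x = [semilla]
--     for i in range(1, 10):
--         n = (a * x[i - 1]) % m
--         x.append(n)
--     for j in range(len(x)):
--         # Convertir a texto
--         dato = str(x[j])
--         # Se extraen los cuatro primeros caracteres
--         x[j] = dato[:4]
--     return x
-- ===== SOURCE B (Python) =====
-- def datos_tarjeta(semilla):
--     m = (2 ** 31) - 1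
--     a = 630360016
--     return [str(semilla)[:4]] + [str(pow(a, i, m) * semilla % m)[:4] for i in range(1, 10)]
-- ===== Notes on version B (the rewrite author's own statement) =====
-- stated objective: alternative
-- what changed: Replaces A's sequential recurrence (each value computed from the previous via x[i-1] lookback, then a second pass truncating in place) with the closed form x_i = pow(a, i, m) * semilla % m, building the result in one comprehension with no intermediate numeric list; correct because (a*x) % m iterated i times equals (a^i * semilla) % m.
import Mathlib
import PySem

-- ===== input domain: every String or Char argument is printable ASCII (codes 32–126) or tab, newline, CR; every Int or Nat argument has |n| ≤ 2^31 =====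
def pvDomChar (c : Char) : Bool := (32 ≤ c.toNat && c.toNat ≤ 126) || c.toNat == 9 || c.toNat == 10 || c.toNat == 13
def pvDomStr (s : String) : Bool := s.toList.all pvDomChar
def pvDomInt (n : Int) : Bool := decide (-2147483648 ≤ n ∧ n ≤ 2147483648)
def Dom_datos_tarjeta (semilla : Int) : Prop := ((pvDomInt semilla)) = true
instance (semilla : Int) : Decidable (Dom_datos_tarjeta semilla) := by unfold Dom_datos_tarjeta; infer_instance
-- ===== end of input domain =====

-- B replaces A's sequential recurrence with the closed form x_i = (a^i mod m) * semilla mod m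
-- via modular exponentiation (pow(a, i, m)); equivalence of return values proved below.
-- ===== PORT A =====
-- Python's second loop rewrites x[j] in place from int to str; with typed lists this is the
-- element-wise map over the same list (same values, same order) — exact for the return value.
def datos_tarjeta (semilla : Int) : List String :=
  let m : Int := 2 ^ 31 - 1
  let a : Int := 630360016
  let x : List Int :=
    (PySem.List.pyRange 1 10 1).foldl
      (fun x i => x ++ [PySem.Int.mod (a * PySem.List.pyGetD x (i - 1) 0) m]) [semilla]
  x.map (fun v => PySem.Str.slice (PySem.Int.toStr v) none (some 4))

-- ===== PORT B =====
def datos_tarjeta_alt (semilla : Int) : List String :=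
  let m : Int := 2 ^ 31 - 1
  let a : Int := 630360016
  [PySem.Str.slice (PySem.Int.toStr semilla) none (some 4)] ++
    (PySem.List.pyRange 1 10 1).map (fun i =>
      PySem.Str.slice
        (PySem.Int.toStr (PySem.Int.mod (PySem.Int.powMod a i.toNat m * semilla) m))
        none (some 4))

-- ===== PRECONDITION & SPEC =====
def Spec_datos_tarjeta (semilla : Int) (out : List String) : Prop := out = datos_tarjeta_alt semilla
instance (semilla : Int) (out : List String) : Decidable (Spec_datos_tarjeta semilla out) := by unfold Spec_datos_tarjeta; infer_instance

-- ===== CLAIM =====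
def Claim_equal_datos_tarjeta : Prop := ∀ (semilla : Int), Dom_datos_tarjeta semilla → Spec_datos_tarjeta semilla (datos_tarjeta semilla)

-- ===== LEMMAS AND PROOFS =====
-- (a * (y % m)) % m = (a * y) % m for the LCG multiplier and modulus
lemma pv_step (y : Int) :
    (630360016 * (y % 2147483647)) % 2147483647 = (630360016 * y) % 2147483647 := by
  conv_lhs => rw [Int.mul_emod]
  conv_rhs => rw [Int.mul_emod]
  rw [Int.emod_emod_of_dvd _ dvd_rfl]

lemma pv_pow (y : Int) (k : Nat) :
    ((630360016 ^ k % 2147483647) * y) % 2147483647 = (630360016 ^ k * y) % 2147483647 := by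
  conv_lhs => rw [Int.mul_emod]
  conv_rhs => rw [Int.mul_emod]
  rw [Int.emod_emod_of_dvd _ dvd_rfl]

-- ===== VERDICT =====
theorem datos_tarjeta_spec : Claim_equal_datos_tarjeta := by
  intro semilla _
  unfold Spec_datos_tarjeta datos_tarjeta datos_tarjeta_alt
  rw [show PySem.List.pyRange 1 10 1 = [1,2,3,4,5,6,7,8,9] from rfl]
  simp only [PySem.Int.powMod]
  norm_num [PySem.List.pyGetD, PySem.List.pyGet?, PySem.List.pyIdx?, show Int.toNat 2 = 2 from rfl, show Int.toNat 3 = 3 from rfl, show Int.toNat 4 = 4 from rfl, show Int.toNat 5 = 5 from rfl, show Int.toNat 6 = 6 from rfl, show Int.toNat 7 = 7 from rfl, show Int.toNat 8 = 8 from rfl, show Int.toNat 9 = 9 from rfl, List.getElem?_cons_succ, List.getElem?_cons_zero,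
    PySem.Int.mod_eq_emod_of_pos (show (0:Int) < 2^31-1 by norm_num), pv_pow, pv_step]
  ring_nf
  exact ⟨trivial, trivial, trivial, trivial, trivial, trivial, trivial, trivial⟩
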